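-- pv_equiv track=rewrite | github.com/rizarae-p/reef-stitching | map.py | parse_vgg
-- ===== SOURCE A (Python) =====
-- def parse_vgg(l):
-- 	d = {}
-- 	for i in l:
-- 		i = i.strip().split(",")
-- 		imagename = i[0]
-- 		coords = [int(x) for x in i[2:]]
-- 		if imagename not in d.keys():
-- 			d[imagename] = [coords]
-- 		else:
-- 			d[imagename].append(coords)
-- 	return d
-- ===== SOURCE B (Python) =====
-- def parse_vgg(l):
--     # Alternative decomposition: parse all rows first, then dedup the image
--     # names in first-occurrence order, then build each group by filtering.
--     rows = []
--     for line in l: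
--         f = line.strip().split(",")
--         rows.append((f[0], [int(x) for x in f[2:]]))
--     names = []
--     for name, _ in rows:
--         if name not in names:
--             names.append(name)
--     return {n: [c for m, c in rows if m == n] for n in names}
-- ===== Notes on version B (the rewrite author's own statement) =====
-- stated objective: alternative
-- what changed: A builds the dict incrementally in one pass (membership test + insert/append per row); B first parses all rows into a flat list, dedups the image names in first-occurrence order, and then constructs each group by filtering the row list per name.
import Mathlib
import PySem

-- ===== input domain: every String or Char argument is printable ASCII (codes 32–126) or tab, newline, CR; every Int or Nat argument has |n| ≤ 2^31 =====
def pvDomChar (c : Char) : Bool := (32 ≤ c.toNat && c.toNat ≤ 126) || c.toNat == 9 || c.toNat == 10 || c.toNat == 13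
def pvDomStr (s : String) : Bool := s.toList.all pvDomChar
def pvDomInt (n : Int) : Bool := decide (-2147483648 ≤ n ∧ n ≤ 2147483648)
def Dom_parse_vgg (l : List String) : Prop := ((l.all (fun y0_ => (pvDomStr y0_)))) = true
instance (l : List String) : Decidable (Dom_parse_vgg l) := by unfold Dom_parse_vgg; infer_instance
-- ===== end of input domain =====

-- B re-groups via parse-all-rows / dedup-names / filter-per-name instead of A's incremental dict build; same return value (alternative decomposition, no speed claim).


-- ===== PORT A =====
-- the row parsing both Pythons perform verbatim on each line:
-- i = line.strip().split(","); (i[0], [int(x) for x in i[2:]]).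
-- sep "," ≠ "" so split? is never none; split's result is nonempty so headD's
-- default is never used; Pre_ excludes the int() ValueError inputs, so the
-- ofStr? .getD defaults are never reached there either.
def pvRow (s : String) : String × List Int :=
  let f := (PySem.Str.split? (PySem.Str.strip s) ",").getD []
  (f.headD "", (PySem.List.slice f (some 2) none).map (fun x => (PySem.Int.ofStr? x).getD 0))

-- A's dict update for one parsed row (imagename = r.1, coords = r.2):
-- start a new entry, or append to the existing one (d[imagename].append(coords))
def pvStepA (d : PySem.Dict String (List (List Int))) (r : String × List Int) :
    PySem.Dict String (List (List Int)) :=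
  if !(d.contains r.1) then d.insert r.1 [r.2] else d.modify r.1 [] (fun v => v ++ [r.2])

def parse_vgg (l : List String) : List (String × List (List Int)) :=
  (l.foldl (fun d s => pvStepA d (pvRow s)) PySem.Dict.empty).items

-- ===== PORT B =====
def parse_vgg_alt (l : List String) : List (String × List (List Int)) :=
  let rows := l.map pvRow
  let names := rows.foldl (fun ns (r : String × List Int) =>
      if r.1 ∈ ns then ns else ns ++ [r.1]) []
  names.map (fun n => (n, (rows.filter (fun r => r.1 == n)).map (fun r => r.2)))

-- ===== PRECONDITION & SPEC =====
-- Pre_ excludes exactly the inputs where Python A raises ValueError: some field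
-- past index 2 of a stripped, comma-split line is not an int literal (B raises there too).
def Pre_parse_vgg (l : List String) : Prop :=
  ∀ s ∈ l, ∀ x ∈ PySem.List.slice ((PySem.Str.split? (PySem.Str.strip s) ",").getD []) (some 2) none,
    (PySem.Int.ofStr? x).isSome = true
instance (l : List String) : Decidable (Pre_parse_vgg l) := by unfold Pre_parse_vgg; infer_instance

def pvWitness_parse_vgg : List String :=
  ["img1.jpg,poly,1,2,3", " img2.jpg,poly,4 ", "img1.jpg,poly,5"]

def Spec_parse_vgg (l : List String) (out : List (String × List (List Int))) : Prop := out = parse_vgg_alt l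
instance (l : List String) (out : List (String × List (List Int))) : Decidable (Spec_parse_vgg l out) := by unfold Spec_parse_vgg; infer_instance

-- ===== CLAIM (what is proved, stated in full; the proofs are below) =====
def Claim_equal_parse_vgg : Prop := ∀ (l : List String), Dom_parse_vgg l → Pre_parse_vgg l → Spec_parse_vgg l (parse_vgg l)

-- ===== LEMMAS AND PROOFS =====

-- the coordinate lists of the rows whose name is n, in row order
def pvSnds (n : String) (rows : List (String × List Int)) : List (List Int) :=
  (rows.filter (fun r => r.1 == n)).map (fun r => r.2)

-- the distinct row names not in `seen`, in first-occurrence order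
def pvFresh (seen : List String) : List (String × List Int) → List String
  | [] => []
  | r :: rest => if r.1 ∈ seen then pvFresh seen rest else r.1 :: pvFresh (r.1 :: seen) rest

theorem pvFresh_congr {seen seen' : List String} (rows : List (String × List Int))
    (h : ∀ n, n ∈ seen ↔ n ∈ seen') : pvFresh seen rows = pvFresh seen' rows := by
  induction rows generalizing seen seen' with
  | nil => rfl
  | cons r rest ih =>
    simp only [pvFresh]
    by_cases hm : r.1 ∈ seen
    · rw [if_pos hm, if_pos ((h r.1).mp hm)]; exact ih h
    · rw [if_neg hm, if_neg (fun hx => hm ((h r.1).mpr hx))]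
      exact congrArg _ (ih (by intro n; simp [h n]))

theorem pvFresh_not_mem_seen {seen : List String} {rows : List (String × List Int)}
    {n : String} (h : n ∈ pvFresh seen rows) : n ∉ seen := by
  induction rows generalizing seen with
  | nil => simp [pvFresh] at h
  | cons r rest ih =>
    simp only [pvFresh] at h
    by_cases hm : r.1 ∈ seen
    · rw [if_pos hm] at h; exact ih h
    · rw [if_neg hm] at h
      rcases List.mem_cons.mp h with h1 | h1
      · exact h1 ▸ hm
      · intro hn; exact (ih h1) (List.mem_cons_of_mem _ hn)

theorem pvSnds_cons (n : String) (r : String × List Int) (rows : List (String × List Int)) :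
    pvSnds n (r :: rows) = if r.1 = n then r.2 :: pvSnds n rows else pvSnds n rows := by
  simp only [pvSnds, List.filter_cons]
  by_cases h : r.1 = n <;> simp [h]

theorem pvFoldA_items (rows : List (String × List Int)) :
    ∀ d : PySem.Dict String (List (List Int)), d.keys.Nodup →
    (rows.foldl pvStepA d).items =
      d.items.map (fun kv => (kv.1, kv.2 ++ pvSnds kv.1 rows)) ++
      (pvFresh d.keys rows).map (fun n => (n, pvSnds n rows)) := by
  induction rows with
  | nil => intro d _; simp [pvFresh, pvSnds]
  | cons r rest ih =>
    intro d hnd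
    simp only [List.foldl_cons, pvStepA]
    by_cases hc : d.contains r.1 = true
    · -- r.1 already a key: modify appends to the existing entry
      rw [if_neg (by simp [hc])]
      have hkeys : (d.modify r.1 [] (fun v => v ++ [r.2])).keys = d.keys := by
        rw [PySem.Dict.keys_modify]; exact PySem.Dict.keys_insert_of_contains d _ hc
      rw [ih _ (hkeys ▸ hnd), hkeys]
      have hmem : r.1 ∈ d.keys := (PySem.Dict.contains_iff_mem_keys d r.1).mp hc
      have hfresh : pvFresh d.keys (r :: rest) = pvFresh d.keys rest := by
        simp [pvFresh, hmem]
      rw [hfresh]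
      congr 1
      · -- the mapped items coincide
        have hitems : (d.modify r.1 [] (fun v => v ++ [r.2])).items
            = d.items.map (fun p => if p.1 == r.1 then (r.1, d.getD r.1 [] ++ [r.2]) else p) := by
          simp only [PySem.Dict.modify]
          exact PySem.Dict.items_insert_of_contains d _ hc
        rw [hitems, List.map_map]
        apply List.map_congr_left
        intro p hp
        by_cases hpk : (p.1 == r.1) = true
        · have hpe : p.1 = r.1 := beq_iff_eq.mp hpk
          have hp2 : (r.1, p.2) ∈ d.items := by rw [← hpe]; exact hp
          have hget : d.getD r.1 [] = p.2 := PySem.Dict.getD_of_mem_items d hp2 hnd []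
          simp [Function.comp, hget, hpe, pvSnds_cons]
        · have hpe : p.1 ≠ r.1 := by simpa using hpk
          simp [Function.comp, hpk, pvSnds_cons, Ne.symm hpe]
      · apply List.map_congr_left
        intro n hn
        have hne : n ≠ r.1 := fun he => (pvFresh_not_mem_seen hn) (he ▸ hmem)
        simp [pvSnds_cons, Ne.symm hne]
    · -- new key: the entry is appended at the end
      rw [if_pos (by simp [hc])]
      have hcb : d.contains r.1 = false := by simpa using hc
      have hitems := PySem.Dict.items_insert_of_not_contains d [r.2] hcb
      have hkeys := PySem.Dict.keys_insert_of_not_contains d [r.2] hcb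
      have hmemk : r.1 ∉ d.keys := fun hx => by
        simp [(PySem.Dict.contains_iff_mem_keys d r.1).mpr hx] at hcb
      have hnd' : (d.keys ++ [r.1]).Nodup := by
        simp [List.nodup_append, hnd]
        exact fun a ha he => hmemk (he ▸ ha)
      rw [ih _ (by rw [hkeys]; exact hnd'), hitems, hkeys]
      have hfresh : pvFresh d.keys (r :: rest) = r.1 :: pvFresh (r.1 :: d.keys) rest := by
        simp [pvFresh, hmemk]
      rw [hfresh,
        pvFresh_congr rest (seen := d.keys ++ [r.1]) (seen' := r.1 :: d.keys) (by intro n; simp; tauto)]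
      simp only [List.map_append, List.map_cons, List.map_nil, List.append_assoc]
      congr 1
      · apply List.map_congr_left
        intro p hp
        have hpe : p.1 ≠ r.1 := by
          intro he; exact hmemk (he ▸ List.mem_map_of_mem hp)
        simp [pvSnds_cons, Ne.symm hpe]
      · simp only [List.cons_append, List.nil_append]
        congr 1
        · simp [pvSnds_cons]
        · apply List.map_congr_left
          intro n hn
          have hne : n ≠ r.1 := fun he =>
            (pvFresh_not_mem_seen hn) (he ▸ List.mem_cons_self)
          simp [pvSnds_cons, Ne.symm hne]

theorem pvFoldNames (rows : List (String × List Int)) :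
    ∀ acc : List String,
      rows.foldl (fun ns (r : String × List Int) =>
        if r.1 ∈ ns then ns else ns ++ [r.1]) acc = acc ++ pvFresh acc rows := by
  induction rows with
  | nil => intro acc; simp [pvFresh]
  | cons r rest ih =>
    intro acc
    simp only [List.foldl_cons, pvFresh]
    by_cases h : r.1 ∈ acc
    · simp [h, ih]
    · rw [if_neg h, if_neg h, ih,
        pvFresh_congr rest (seen := acc ++ [r.1]) (seen' := r.1 :: acc) (by intro n; simp; tauto)]
      simp

-- ===== VERDICT (by name: the statement is the Claim_ definition above) =====
theorem parse_vgg_spec : Claim_equal_parse_vgg := by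
  intro l _ _
  simp only [Spec_parse_vgg, parse_vgg, parse_vgg_alt]
  rw [← List.foldl_map (f := pvRow) (g := pvStepA)]
  rw [pvFoldA_items (l.map pvRow) PySem.Dict.empty (by simp)]
  rw [pvFoldNames (l.map pvRow) []]
  simp [PySem.Dict.empty, PySem.Dict.keys, pvSnds]
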